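-- pv_equiv track=rewrite | github.com/predicateacademy/physical-computing | lightshow/lightshow_patterns.py | throw_right
-- ===== SOURCE A (Python) =====
-- def on(led):
-- 	patterns = []
-- 	pattern = ''
-- 	for x in range(len(led)):
-- 		pattern += '1'
-- 	patterns.append(pattern)
-- 	return patterns
--
-- def throw_right(led):
--    patterns = []
--    for x in range(len(led)):
--       l = left_right(led)
--       for item in l:
--          for idx in range(x):
--             tlist = list(item)
--             tlist[len(tlist)-idx-1] = '1'
--             item = ''.join(tlist)
--          patterns.append(item)
--    patterns.extend(on(led))
--    return patterns
--
-- def left_right(led):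
--    patterns = []
--    for x in range(len(led)):
--       pattern = ''
--       for y in range(len(led)):
--          if x == y:
--             pattern += '1'
--          else:
--             pattern += '0'
--       patterns.append(pattern)
--    return patterns
-- ===== SOURCE B (Python) =====
-- def throw_right(led):
--     n = len(led)
--     frames = [''.join('1' if j == p or j >= n - x else '0' for j in range(n))
--               for x in range(n) for p in range(n)]
--     frames.append('1' * n)
--     return frames
-- ===== Notes on version B (the rewrite author's own statement) =====
-- stated objective: faster
-- what changed: Replaced the left_right helper plus the incremental bit-setting inner loop (which rebuilds the string via list/join once per set bit) with a direct one-formula construction of each frame: a character is a one iff its index is the moving position or lies in the right fill suffix, followed by one final all-ones frame.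
import Mathlib
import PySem

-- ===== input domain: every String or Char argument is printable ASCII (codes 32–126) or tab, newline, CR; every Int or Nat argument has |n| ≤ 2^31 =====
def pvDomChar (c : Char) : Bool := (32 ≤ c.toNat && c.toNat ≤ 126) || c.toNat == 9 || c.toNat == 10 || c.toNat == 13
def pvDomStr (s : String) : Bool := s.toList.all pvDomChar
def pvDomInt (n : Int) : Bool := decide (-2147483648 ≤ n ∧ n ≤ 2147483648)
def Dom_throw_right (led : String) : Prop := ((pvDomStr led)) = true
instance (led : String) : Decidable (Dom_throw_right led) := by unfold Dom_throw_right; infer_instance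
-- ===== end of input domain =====

-- B replaces A's helper calls and incremental bit-setting inner loop with a direct
-- one-formula construction of each frame (simpler decomposition; same cost class).

-- ===== PORT A =====
-- helper 'on' from A's module
def onA (led : String) : List String :=
  let pattern := (List.range led.toList.length).foldl (fun acc _ => acc ++ ['1']) ([] : List Char)
  [String.ofList pattern]

-- helper 'left_right' from A's module
def left_rightA (led : String) : List String :=
  (List.range led.toList.length).foldl (fun pats x =>
    let pattern := (List.range led.toList.length).foldl
      (fun p y => if x = y then p ++ ['1'] else p ++ ['0']) ([] : List Char)
    pats ++ [String.ofList pattern]) []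

def throw_right (led : String) : List String :=
  let patterns := (List.range led.toList.length).foldl (fun pats x =>
    let l := left_rightA led
    l.foldl (fun pats item =>
      -- for idx in range(x): tlist = list(item); tlist[len-idx-1] = '1'; item = ''.join(tlist)
      let item := (List.range x).foldl (fun (item : String) idx =>
        let tlist := item.toList
        let tlist := tlist.set (tlist.length - idx - 1) '1'
        String.ofList tlist) item
      pats ++ [item]) pats) []
  patterns ++ onA led

-- ===== PORT B =====
def throw_right_alt (led : String) : List String :=
  let n := led.toList.length
  let frames := (List.range n).flatMap (fun x =>
    (List.range n).map (fun p =>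
      String.ofList ((List.range n).map (fun j =>
        if j = p ∨ n - x ≤ j then '1' else '0'))))
  frames ++ [String.ofList (List.replicate n '1')]

-- ===== PRECONDITION & SPEC =====
def Spec_throw_right (led : String) (out : List String) : Prop := out = throw_right_alt led
instance (led : String) (out : List String) : Decidable (Spec_throw_right led out) := by unfold Spec_throw_right; infer_instance

-- ===== CLAIM (what is proved, stated in full; the proofs are below) =====
def Claim_equal_throw_right : Prop := ∀ (led : String), Dom_throw_right led → Spec_throw_right led (throw_right led)

-- ===== LEMMAS AND PROOFS =====

-- '1'-append loop builds a replicate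
theorem ones_loop (n : ℕ) :
    (List.range n).foldl (fun acc _ => acc ++ ['1']) ([] : List Char) = List.replicate n '1' := by
  induction n with
  | zero => simp
  | succ k ih => rw [List.range_succ, List.foldl_append, ih]; simp [List.replicate_succ']

theorem onA_eq (led : String) :
    onA led = [String.ofList (List.replicate led.toList.length '1')] := by
  unfold onA
  simp only [ones_loop]

theorem pattern_loop (x n : ℕ) :
    (List.range n).foldl (fun p y => if x = y then p ++ ['1'] else p ++ ['0']) ([] : List Char)
      = (List.range n).map (fun y => if x = y then '1' else '0') := by
  have h : ∀ (l : List ℕ) (acc : List Char),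
      l.foldl (fun p y => if x = y then p ++ ['1'] else p ++ ['0']) acc
        = acc ++ l.map (fun y => if x = y then '1' else '0') := by
    intro l
    induction l with
    | nil => simp
    | cons a t ih =>
      intro acc
      rw [List.foldl_cons, ih]
      by_cases hx : x = a <;> simp [hx]
  simpa using h (List.range n) []

theorem left_rightA_eq (led : String) :
    left_rightA led = (List.range led.toList.length).map (fun x =>
      String.ofList ((List.range led.toList.length).map (fun y => if x = y then '1' else '0'))) := by
  unfold left_rightA
  generalize led.toList.length = n
  simp only [pattern_loop]
  simpa using PySem.List.foldl_append_singleton_eq_map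
    (l := List.range n) (acc := [])
    (f := fun x => String.ofList ((List.range n).map (fun y => if x = y then '1' else '0')))

-- the idx-loop sets the last x positions of a length-n pattern to '1'
theorem set_loop (n x : ℕ) (hx : x ≤ n) (f : ℕ → Char) :
    (List.range x).foldl (fun (item : String) _idx =>
        String.ofList (item.toList.set (item.toList.length - _idx - 1) '1'))
      (String.ofList ((List.range n).map f))
      = String.ofList ((List.range n).map (fun j => if n - x ≤ j then '1' else f j)) := by
  induction x with
  | zero =>
    simp only [List.range_zero, List.foldl_nil, Nat.sub_zero]
    congr 1
    refine (List.map_congr_left ?_).symm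
    intro j hj
    rw [if_neg (by simp at hj; omega)]
  | succ k ih =>
    have hk : k ≤ n := by omega
    rw [List.range_succ, List.foldl_append, ih hk]
    simp only [List.foldl_cons, List.foldl_nil, String.toList_ofList, List.length_map,
      List.length_range]
    congr 1
    apply List.ext_getElem
    · simp
    · intro i hi hi'
      simp only [List.length_map, List.length_range] at hi'
      rw [List.getElem_set]
      simp only [List.getElem_map, List.getElem_range]
      by_cases hc : n - k - 1 = i
      · subst hc
        rw [if_pos rfl, if_pos (by omega)]
      · rw [if_neg hc]
        by_cases h1 : n - k ≤ i
        · rw [if_pos h1, if_pos (by omega)]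
        · rw [if_neg h1, if_neg (by omega)]

theorem main_eq (led : String) : throw_right led = throw_right_alt led := by
  unfold throw_right throw_right_alt
  simp only [left_rightA_eq, onA_eq]
  generalize led.toList.length = n
  congr 1
  have hcong : ∀ (acc : List String) (x : ℕ), x ∈ List.range n →
      ((List.range n).map (fun p =>
          String.ofList ((List.range n).map (fun y => if p = y then '1' else '0')))).foldl
        (fun pats item =>
          pats ++ [(List.range x).foldl (fun (item : String) idx =>
            String.ofList (item.toList.set (item.toList.length - idx - 1) '1')) item])
        acc
      = acc ++ ((List.range n).map (fun p =>
          String.ofList ((List.range n).map (fun j => if j = p ∨ n - x ≤ j then '1' else '0')))) := by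
    intro acc x hx
    simp only [List.mem_range] at hx
    rw [List.foldl_map, PySem.List.foldl_append_singleton_eq_map]
    congr 1
    apply List.map_congr_left
    intro p hp
    rw [set_loop n x (le_of_lt hx)]
    congr 1
    apply List.map_congr_left
    intro j hj
    by_cases h1 : n - x ≤ j <;> by_cases h2 : p = j <;>
      simp [h1, h2, eq_comm]
  refine Eq.trans (PySem.List.foldl_congr_mem (List.range n) _
    (fun (pats : List String) (x : ℕ) =>
      pats ++ ((List.range n).map (fun p =>
        String.ofList ((List.range n).map (fun j => if j = p ∨ n - x ≤ j then '1' else '0')))))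
    [] hcong) ?_
  rw [PySem.List.foldl_append_eq_flatMap]
  simp

-- ===== VERDICT (by name: the statement is the Claim_ definition above) =====
theorem throw_right_spec : Claim_equal_throw_right := by
  intro led _
  exact main_eq led
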